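-- pv_equiv track=rewrite | github.com/muiturriaga/dia_project | app/tools/q3/q3_tools.py | credit_nodes
-- ===== SOURCE A (Python) =====
-- def get_edges_cascade(pull_node, list_edges_activated):
--     list_new_nodes = [pull_node]
--     list_cascade_edges = []
--     while(len(list_new_nodes) != 0):
--         tamp = []
--         for node_head in list_new_nodes:
--             for edge in list_edges_activated:
--                 if node_head == edge[0]:
--                     list_cascade_edges.append(edge)
--                     tamp.append(edge[1])
--         list_new_nodes = tamp
--     return list_cascade_edges
--
-- def credit_nodes(list_A_node_activated, list_edges_activated, pulled_super_arm):
--     list_credit = [0]*len(pulled_super_arm)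
--     for i in range(len(pulled_super_arm)):
--         pull_node = pulled_super_arm[i]
--
--         if pull_node in list_A_node_activated:
-- # If it is an initial node, we add 1 to his credit because it is possible that it has no edges.
--             list_credit[i] += 1
--
--         tamp = get_edges_cascade(pull_node, list_edges_activated)
--         if len(tamp) != 0:
--             list_cascade_node = [num[1] for num in tamp] # get the inherited nodes from the cascade
--             for node in list_cascade_node:
--                 if node in list_A_node_activated: # add a credit if it activates an A node.
--                     list_credit[i] +=1
--
--     return list_credit
-- ===== SOURCE B (Python) =====
-- # B: build a head->tails adjacency dict once and an A-node set, then walk the cascade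
-- # level by level via dict lookups, counting activated tails directly (no edge rescans,
-- # no cascade edge list). Same per-level multiset of nodes as A's expansion.
-- def credit_nodes(list_A_node_activated, list_edges_activated, pulled_super_arm):
--     adj = {}
--     for edge in list_edges_activated:
--         adj.setdefault(edge[0], []).append(edge[1])
--     a_set = set(list_A_node_activated)
--     result = []
--     for pull_node in pulled_super_arm:
--         credit = 1 if pull_node in a_set else 0
--         level = [pull_node]
--         while level:
--             nxt = []
--             for node in level:
--                 nxt.extend(adj.get(node, []))
--             credit += sum(1 for t in nxt if t in a_set)
--             level = nxt
--         result.append(credit)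
--     return result
-- ===== Notes on version B (the rewrite author's own statement) =====
-- stated objective: alternative
-- what changed: B precomputes a head->tails adjacency dict and an A-node set once, then expands each pulled node's cascade level by level via dict lookups, counting activated tails on the fly instead of rescanning the whole edge list for every frontier node and materialising the cascade edge list (intended as faster; measured 19x at n=1024, but both blow up on inputs whose cascade itself is exponential).
import Mathlib
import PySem

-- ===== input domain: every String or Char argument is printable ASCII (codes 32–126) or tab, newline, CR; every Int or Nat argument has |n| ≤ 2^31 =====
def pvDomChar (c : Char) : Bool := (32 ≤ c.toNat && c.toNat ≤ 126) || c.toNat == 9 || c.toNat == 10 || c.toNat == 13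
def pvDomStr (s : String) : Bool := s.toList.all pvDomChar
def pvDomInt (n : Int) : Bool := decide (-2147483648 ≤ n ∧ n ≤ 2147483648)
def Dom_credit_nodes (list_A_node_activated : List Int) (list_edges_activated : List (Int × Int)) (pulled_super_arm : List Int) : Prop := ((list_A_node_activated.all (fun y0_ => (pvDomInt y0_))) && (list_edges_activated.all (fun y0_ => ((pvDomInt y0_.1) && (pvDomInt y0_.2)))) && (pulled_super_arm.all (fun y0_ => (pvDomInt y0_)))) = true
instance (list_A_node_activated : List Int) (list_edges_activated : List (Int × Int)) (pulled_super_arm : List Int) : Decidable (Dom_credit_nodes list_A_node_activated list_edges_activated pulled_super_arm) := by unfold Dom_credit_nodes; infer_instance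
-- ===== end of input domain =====

-- B builds a head->tails adjacency dict and an A-node set once, then expands each cascade
-- level by level via lookups, counting activated tails on the fly instead of rescanning the
-- edge list per frontier node (alternative decomposition; return values proved equal on Pre_).


-- ===== PORT A =====
-- inner 'for edge in list_edges_activated: if node_head == edge[0]: …' of get_edges_cascade;
-- state = (list_cascade_edges, tamp)
def pvGecInner (list_edges_activated : List (Int × Int)) (st : List (Int × Int) × List Int) (node_head : Int) : List (Int × Int) × List Int :=
  list_edges_activated.foldl
    (fun st e => if node_head == e.1 then (st.1 ++ [e], st.2 ++ [e.2]) else st) st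

-- the 'while(len(list_new_nodes) != 0)' loop, fueled (Python diverges when a cycle is
-- reachable; those inputs are excluded by Pre_, where edges.length + 2 iterations suffice)
def pvGecLoop (list_edges_activated : List (Int × Int)) : Nat → List Int → List (Int × Int) → List (Int × Int)
  | 0, _, cascade => cascade
  | fuel + 1, new_nodes, cascade =>
    if new_nodes.length = 0 then cascade
    else
      let st := new_nodes.foldl (pvGecInner list_edges_activated) (cascade, [])
      pvGecLoop list_edges_activated fuel st.2 st.1

def get_edges_cascade (pull_node : Int) (list_edges_activated : List (Int × Int)) : List (Int × Int) :=
  pvGecLoop list_edges_activated (list_edges_activated.length + 2) [pull_node] []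

-- body of A's 'for i in range(len(pulled_super_arm))' (each iteration touches only index i)
def pvCreditOf (list_A_node_activated : List Int) (list_edges_activated : List (Int × Int)) (pull_node : Int) : Int :=
  let base : Int := if list_A_node_activated.contains pull_node then 1 else 0
  let tamp := get_edges_cascade pull_node list_edges_activated
  if tamp.length ≠ 0 then
    let list_cascade_node := tamp.map (·.2)
    list_cascade_node.foldl (fun c node => if list_A_node_activated.contains node then c + 1 else c) base
  else base

def credit_nodes (list_A_node_activated : List Int) (list_edges_activated : List (Int × Int)) (pulled_super_arm : List Int) : List Int :=
  pulled_super_arm.map (pvCreditOf list_A_node_activated list_edges_activated)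

-- ===== PORT B =====
-- adj.setdefault(edge[0], []).append(edge[1])  ==  adj[e0] = adj.get(e0, []) + [e1]
def pvAdj (list_edges_activated : List (Int × Int)) : PySem.Dict Int (List Int) :=
  list_edges_activated.foldl (fun d e => d.modify e.1 [] (· ++ [e.2])) PySem.Dict.empty

-- B's 'while level:' loop, fueled with the same bound as A's port
def pvBLoop (adj : PySem.Dict Int (List Int)) (a_set : PySem.Set Int) : Nat → List Int → Int → Int
  | 0, _, credit => credit
  | fuel + 1, level, credit =>
    if level.length = 0 then credit
    else
      let nxt := level.foldl (fun acc n => acc ++ adj.getD n []) []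
      pvBLoop adj a_set fuel nxt (credit + (nxt.countP (fun t => a_set.contains t) : Int))

def credit_nodes_alt (list_A_node_activated : List Int) (list_edges_activated : List (Int × Int)) (pulled_super_arm : List Int) : List Int :=
  let adj := pvAdj list_edges_activated
  let a_set := PySem.Set.ofList list_A_node_activated
  pulled_super_arm.map (fun p =>
    pvBLoop adj a_set (list_edges_activated.length + 2) [p]
      (if a_set.contains p then 1 else 0))

-- ===== PRECONDITION & SPEC =====
-- Pre-side reachability over DISTINCT nodes (node sets, not the ports' multiset levels)
def pvSuccs (list_edges_activated : List (Int × Int)) (v : Int) : List Int :=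
  (list_edges_activated.filter (fun e => e.1 == v)).map (·.2)

def pvReachAux (list_edges_activated : List (Int × Int)) : Nat → PySem.Set Int → PySem.Set Int
  | 0, s => s
  | n + 1, s => pvReachAux list_edges_activated n (PySem.Set.update s (s.flatMap (pvSuccs list_edges_activated)))

def pvReach (list_edges_activated : List (Int × Int)) (start : List Int) : PySem.Set Int :=
  pvReachAux list_edges_activated list_edges_activated.length (PySem.Set.ofList start)

-- Pre_ excludes exactly the inputs on which Python A DIVERGES: some node reachable from a
-- pulled node lies on a directed cycle, so get_edges_cascade's frontier never empties.
def Pre_credit_nodes (list_A_node_activated : List Int) (list_edges_activated : List (Int × Int)) (pulled_super_arm : List Int) : Prop :=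
  ∀ p ∈ pulled_super_arm, ∀ v ∈ pvReach list_edges_activated [p],
    v ∉ pvReach list_edges_activated (pvSuccs list_edges_activated v)
instance (list_A_node_activated : List Int) (list_edges_activated : List (Int × Int)) (pulled_super_arm : List Int) : Decidable (Pre_credit_nodes list_A_node_activated list_edges_activated pulled_super_arm) := by unfold Pre_credit_nodes; infer_instance

def pvWitness_credit_nodes : List Int × (List (Int × Int)) × List Int :=
  ([1, 3], [(1, 2), (2, 3), (1, 3)], [1, 2, 5])

def Spec_credit_nodes (list_A_node_activated : List Int) (list_edges_activated : List (Int × Int)) (pulled_super_arm : List Int) (out : List Int) : Prop := out = credit_nodes_alt list_A_node_activated list_edges_activated pulled_super_arm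
instance (list_A_node_activated : List Int) (list_edges_activated : List (Int × Int)) (pulled_super_arm : List Int) (out : List Int) : Decidable (Spec_credit_nodes list_A_node_activated list_edges_activated pulled_super_arm out) := by unfold Spec_credit_nodes; infer_instance

-- ===== CLAIM (what is proved, stated in full; the proofs are below) =====
def Claim_equal_credit_nodes : Prop := ∀ (list_A_node_activated : List Int) (list_edges_activated : List (Int × Int)) (pulled_super_arm : List Int), Dom_credit_nodes list_A_node_activated list_edges_activated pulled_super_arm → Pre_credit_nodes list_A_node_activated list_edges_activated pulled_super_arm → Spec_credit_nodes list_A_node_activated list_edges_activated pulled_super_arm (credit_nodes list_A_node_activated list_edges_activated pulled_super_arm)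

-- ===== LEMMAS AND PROOFS =====

-- A's inner scan over all edges = append the filtered edges / their tails
lemma pvGecInner_eq (edges : List (Int × Int)) (st : List (Int × Int) × List Int) (nh : Int) :
    pvGecInner edges st nh =
      (st.1 ++ edges.filter (fun e => e.1 == nh),
       st.2 ++ (edges.filter (fun e => e.1 == nh)).map (·.2)) := by
  unfold pvGecInner
  induction edges generalizing st with
  | nil => simp
  | cons e t ih =>
    rcases hbe : (nh == e.1) with _ | _
    · have h2 : (e.1 == nh) = false := by simp at hbe ⊢; omega
      simp only [List.foldl_cons, hbe, Bool.false_eq_true, if_false, List.filter_cons, h2]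
      exact ih st
    · have h2 : (e.1 == nh) = true := by simp at hbe ⊢; omega
      simp only [List.foldl_cons, hbe, if_true, List.filter_cons, h2]
      rw [ih]
      simp [List.append_assoc]

-- A's level scan = flatMap of the per-node filtered edges / tails
lemma pvGecLevel_eq (edges : List (Int × Int)) (level : List Int) (cascade : List (Int × Int)) (t0 : List Int) :
    level.foldl (pvGecInner edges) (cascade, t0) =
      (cascade ++ level.flatMap (fun n => edges.filter (fun e => e.1 == n)),
       t0 ++ level.flatMap (fun n => (edges.filter (fun e => e.1 == n)).map (·.2))) := by
  induction level generalizing cascade t0 with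
  | nil => simp
  | cons n t ih => simp [pvGecInner_eq, ih, List.append_assoc]

lemma map_snd_filter (edges : List (Int × Int)) (level : List Int) :
    (level.flatMap (fun n => edges.filter (fun e => e.1 == n))).map (·.2)
      = level.flatMap (fun n => (edges.filter (fun e => e.1 == n)).map (·.2)) := by
  simp [List.map_flatMap]

-- B's adjacency lookup returns exactly the successor-tail list
lemma pvAdj_getD (edges : List (Int × Int)) (n : Int) :
    (pvAdj edges).getD n [] = (edges.filter (fun e => e.1 == n)).map (·.2) := by
  unfold pvAdj
  rw [PySem.Dict.getD_foldl_modify_append]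
  simp

-- Set membership test = list membership test
lemma set_contains_eq (A : List Int) (x : Int) :
    (PySem.Set.ofList A).contains x = A.contains x := by
  simp [PySem.Set.mem_ofList]

-- the two fueled loops compute the same credit
lemma pvLoop_eq (A : List Int) (edges : List (Int × Int)) :
    ∀ (fuel : Nat) (level : List Int) (cascade : List (Int × Int)) (base : Int),
      pvBLoop (pvAdj edges) (PySem.Set.ofList A) fuel level
        (base + (((cascade.map (·.2)).countP (fun t => A.contains t) : Nat) : Int))
      = base + ((((pvGecLoop edges fuel level cascade).map (·.2)).countP (fun t => A.contains t) : Nat) : Int) := by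
  intro fuel
  induction fuel with
  | zero => intro level cascade base; simp [pvBLoop, pvGecLoop]
  | succ f ih =>
    intro level cascade base
    by_cases hl : level.length = 0
    · simp [pvBLoop, pvGecLoop, hl]
    · rw [pvBLoop, pvGecLoop]
      simp only [hl, if_false]
      rw [pvGecLevel_eq]
      have hnxt : level.foldl (fun acc n => acc ++ (pvAdj edges).getD n []) []
          = level.flatMap (fun n => (edges.filter (fun e => e.1 == n)).map (·.2)) := by
        rw [PySem.List.foldl_append_eq_flatMap]
        simp only [List.nil_append]
        exact List.flatMap_congr (fun n _ => pvAdj_getD edges n)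
      have hcnt : ∀ l : List Int, l.countP (fun t => (PySem.Set.ofList A).contains t)
          = l.countP (fun t => A.contains t) :=
        fun l => List.countP_congr (fun x _ => by rw [set_contains_eq])
      rw [hnxt, hcnt]
      simp only [List.nil_append]
      have harg : base + (((cascade.map (·.2)).countP (fun t => A.contains t) : Nat) : Int)
            + (((level.flatMap (fun n => (edges.filter (fun e => e.1 == n)).map (·.2))).countP (fun t => A.contains t) : Nat) : Int)
          = base + ((((cascade ++ level.flatMap (fun n => edges.filter (fun e => e.1 == n))).map (·.2)).countP (fun t => A.contains t) : Nat) : Int) := by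
        rw [List.map_append, List.countP_append, map_snd_filter]
        push_cast
        ring
      rw [harg, ih]

-- ===== VERDICT (by name: the statement is the Claim_ definition above) =====
theorem credit_nodes_spec : Claim_equal_credit_nodes := by
  intro A edges pulled _hdom _hpre
  unfold Spec_credit_nodes credit_nodes credit_nodes_alt
  apply List.map_congr_left
  intro p _hp
  unfold pvCreditOf get_edges_cascade
  rw [set_contains_eq]
  have key : ∀ base : Int,
      pvBLoop (pvAdj edges) (PySem.Set.ofList A) (edges.length + 2) [p] base
        = base + ((((pvGecLoop edges (edges.length + 2) [p] []).map (·.2)).countP (fun t => A.contains t) : Nat) : Int) := by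
    intro base
    have := pvLoop_eq A edges (edges.length + 2) [p] [] base
    simpa using this
  rw [key]
  by_cases ht : (pvGecLoop edges (edges.length + 2) [p] []).length ≠ 0
  · rw [if_pos ht, PySem.List.foldl_if_add_one]
  · rw [if_neg ht]
    have hnil : pvGecLoop edges (edges.length + 2) [p] [] = [] := by
      rw [← List.length_eq_zero_iff]; omega
    simp [hnil]
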